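-- pv_equiv track=rewrite | github.com/dluiscosta/codewars_solutions | faberg_easter_eggs_crush/faberg_easter_eggs_crush_utilitary.py | max_skyscrapper_height_with_determinable_target_floor
-- ===== SOURCE A (Python) =====
-- def max_skyscrapper_height_with_determinable_target_floor(
--         eggs: int, tries: int) -> int:
--     """
--     Determines the maximum height, in floors, of a skycrapper to which the
--     target floor can always be determined, regardless of the eggs
--     durability, but given limited numbers of eggs to throw and throwing
--     tries (unbroken eggs can be thrown again).
--     """
--     #  dynamic programming table where msh(0,x) = msh(x,0) = 0
--     msh = [[0]*(tries+1)] + [[0]+[None]*tries for i in range(eggs)]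
--     for eggs_ in range(1, eggs+1):
--         for tries_ in range(1, tries+1):
--             msh[eggs_][tries_] = sum(
--                 [msh[eggs_-1][tries__] + 1 for tries__ in range(tries_)]
--             )
--     return msh[eggs][tries]
-- ===== SOURCE B (Python) =====
-- def max_skyscrapper_height_with_determinable_target_floor(
--         eggs: int, tries: int) -> int:
--     """
--     Same function, computed with a rolling single row and the incremental
--     recurrence msh(e, t) = msh(e, t-1) + msh(e-1, t-1) + 1, which removes
--     the inner summation pass (O(eggs*tries) instead of O(eggs*tries^2)).
--     """
--     row = [0] * (tries + 1)
--     for _ in range(eggs):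
--         new = [0] * (tries + 1)
--         for t in range(1, tries + 1):
--             new[t] = new[t - 1] + row[t - 1] + 1
--         row = new
--     return row[tries]
-- ===== Notes on version B (the rewrite author's own statement) =====
-- stated objective: faster
-- what changed: Replaces the full 2D table whose every cell is a fresh O(tries) summation by a rolling single row using the incremental recurrence msh(e,t)=msh(e,t-1)+msh(e-1,t-1)+1, removing the inner summation pass.
-- outside the precondition, e.g. on max_skyscrapper_height_with_determinable_target_floor(1, -1): A returns 0, B raises IndexError
import Mathlib
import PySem

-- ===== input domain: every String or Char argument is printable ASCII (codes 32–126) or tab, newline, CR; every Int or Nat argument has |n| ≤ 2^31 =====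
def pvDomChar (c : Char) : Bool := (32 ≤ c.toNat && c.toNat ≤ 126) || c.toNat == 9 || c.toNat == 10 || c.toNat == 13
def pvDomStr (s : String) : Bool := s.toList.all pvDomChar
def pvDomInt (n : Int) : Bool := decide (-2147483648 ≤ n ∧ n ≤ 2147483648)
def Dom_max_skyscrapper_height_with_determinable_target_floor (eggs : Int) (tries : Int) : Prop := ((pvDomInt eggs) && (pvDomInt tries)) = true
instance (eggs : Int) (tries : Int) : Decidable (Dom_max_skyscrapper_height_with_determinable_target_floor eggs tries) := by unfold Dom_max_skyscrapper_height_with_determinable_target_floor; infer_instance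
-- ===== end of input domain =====

-- B replaces A's 2D table with per-cell O(tries) summations by a rolling single row
-- using the incremental recurrence msh(e,t) = msh(e,t-1) + msh(e-1,t-1) + 1 (objective: faster, asymptotic).


-- ===== PORT A =====
-- Literal transliteration of A: builds the (eggs+1)×(tries+1) table (None = unfilled cell,
-- modelled as Option Int) and fills each cell with a fresh summation over the previous row.
-- pyGetD/Option.getD defaults are only reachable where the Python raises (outside Pre_).
def max_skyscrapper_height_with_determinable_target_floor (eggs : Int) (tries : Int) : Int :=
  let msh : List (List (Option Int)) :=
    [List.replicate (tries + 1).toNat (some 0)] ++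
      (List.range eggs.toNat).map (fun _ => [some 0] ++ List.replicate tries.toNat none)
  let msh :=
    (PySem.List.pyRange 1 (eggs + 1) 1).foldl (fun msh eggs_ =>
      (PySem.List.pyRange 1 (tries + 1) 1).foldl (fun msh tries_ =>
        let v : Int :=
          ((PySem.List.pyRange 0 tries_ 1).map
            (fun tries__ =>
              (PySem.List.pyGetD (PySem.List.pyGetD msh (eggs_ - 1) []) tries__ none).getD 0 + 1)).sum
        PySem.List.pySetD msh eggs_
          (PySem.List.pySetD (PySem.List.pyGetD msh eggs_ []) tries_ (some v))) msh) msh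
  (PySem.List.pyGetD (PySem.List.pyGetD msh eggs []) tries none).getD 0

-- ===== PORT B =====
-- Literal transliteration of B (Source B): rolling row, new[t] = new[t-1] + row[t-1] + 1.
def max_skyscrapper_height_with_determinable_target_floor_alt (eggs : Int) (tries : Int) : Int :=
  let row : List Int := List.replicate (tries + 1).toNat 0
  let row :=
    (List.range eggs.toNat).foldl (fun row _ =>
      (PySem.List.pyRange 1 (tries + 1) 1).foldl (fun new t =>
        PySem.List.pySetD new t
          (PySem.List.pyGetD new (t - 1) 0 + PySem.List.pyGetD row (t - 1) 0 + 1))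
        (List.replicate (tries + 1).toNat 0)) row
  PySem.List.pyGetD row tries 0

-- ===== PRECONDITION & SPEC =====
-- Pre_ excludes negative tries, on which A raises IndexError except at tries = -1 with eggs ≥ 1,
-- where negative-index wraparound makes A return 0 while B raises IndexError; and eggs ≤ -2,
-- where A raises IndexError (msh[eggs] on the one-row table).
def Pre_max_skyscrapper_height_with_determinable_target_floor (eggs : Int) (tries : Int) : Prop :=
  0 ≤ tries ∧ -1 ≤ eggs
instance (eggs : Int) (tries : Int) : Decidable (Pre_max_skyscrapper_height_with_determinable_target_floor eggs tries) := by unfold Pre_max_skyscrapper_height_with_determinable_target_floor; infer_instance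
def pvWitness_max_skyscrapper_height_with_determinable_target_floor : Int × Int := (2, 3)

def Spec_max_skyscrapper_height_with_determinable_target_floor (eggs : Int) (tries : Int) (out : Int) : Prop := out = max_skyscrapper_height_with_determinable_target_floor_alt eggs tries
instance (eggs : Int) (tries : Int) (out : Int) : Decidable (Spec_max_skyscrapper_height_with_determinable_target_floor eggs tries out) := by unfold Spec_max_skyscrapper_height_with_determinable_target_floor; infer_instance

-- ===== CLAIM (what is proved, stated in full; the proofs are below) =====
def Claim_equal_max_skyscrapper_height_with_determinable_target_floor : Prop := ∀ (eggs : Int) (tries : Int), Dom_max_skyscrapper_height_with_determinable_target_floor eggs tries → Pre_max_skyscrapper_height_with_determinable_target_floor eggs tries → Spec_max_skyscrapper_height_with_determinable_target_floor eggs tries (max_skyscrapper_height_with_determinable_target_floor eggs tries)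

-- ===== LEMMAS AND PROOFS =====

-- pvMsh is the egg-drop recurrence both programs compute.
def pvMsh : Nat → Nat → Int
  | 0, _ => 0
  | _ + 1, 0 => 0
  | e + 1, t + 1 => pvMsh (e + 1) t + pvMsh e t + 1

theorem pvMsh_zero (t : Nat) : pvMsh 0 t = 0 := by cases t <;> rfl
theorem pvMsh_e_zero (e : Nat) : pvMsh e 0 = 0 := by cases e <;> rfl
theorem pvMsh_succ (e t : Nat) : pvMsh (e+1) (t+1) = pvMsh (e+1) t + pvMsh e t + 1 := rfl

theorem pvMsh_sum (e t : Nat) :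
    ((List.range t).map (fun k => pvMsh e k + 1)).sum = pvMsh (e + 1) t := by
  induction t with
  | zero => simp [pvMsh_e_zero]
  | succ t ih => rw [List.range_succ]; simp [ih, pvMsh_succ]; ring

def pvRowB (e T : Nat) : List Int := (List.range (T+1)).map (fun t => pvMsh e t)
def pvPartB (e T j : Nat) : List Int :=
  (List.range (T+1)).map (fun t => if t ≤ j then pvMsh e t else 0)

theorem pvPartB_zero (e T : Nat) : pvPartB e T 0 = List.replicate (T+1) 0 := by
  apply List.ext_getElem
  · simp [pvPartB]
  · intro i h1 h2
    simp only [pvPartB, List.getElem_map, List.getElem_range, List.getElem_replicate]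
    split_ifs with h
    · interval_cases i; exact pvMsh_e_zero e
    · rfl

theorem pvPartB_last (e T : Nat) : pvPartB e T T = pvRowB e T := by
  apply List.ext_getElem
  · simp [pvPartB, pvRowB]
  · intro i h1 h2
    have hi : i < T + 1 := by simpa [pvPartB] using h1
    simp only [pvPartB, pvRowB, List.getElem_map, List.getElem_range]
    rw [if_pos (by omega)]

theorem pvB_inner_step (e T j : Nat) (hj : j < T) :
    PySem.List.pySetD (pvPartB (e+1) T j) (1 + (j:Int))
      (PySem.List.pyGetD (pvPartB (e+1) T j) (1 + (j:Int) - 1) 0 +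
       PySem.List.pyGetD (pvRowB e T) (1 + (j:Int) - 1) 0 + 1)
    = pvPartB (e+1) T (j+1) := by
  have h1 : 1 + (j:Int) - 1 = ((j:Nat):Int) := by ring
  have h2 : 1 + (j:Int) = ((j+1 : Nat):Int) := by push_cast; ring
  rw [h1, h2, PySem.List.pySetD_natCast, PySem.List.pyGetD_natCast, PySem.List.pyGetD_natCast]
  rw [pvPartB, pvRowB, PySem.List.getD_map_range _ _ _ _ (by omega),
      PySem.List.getD_map_range _ _ _ _ (by omega)]
  rw [if_pos (le_refl j)]
  apply List.ext_getElem
  · simp [pvPartB]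
  · intro i ha hb
    have hi : i < T + 1 := by simpa using ha
    simp only [List.getElem_set, List.getElem_map, List.getElem_range, pvPartB]
    rcases Nat.lt_trichotomy i (j+1) with h | h | h
    · rw [if_neg (by omega), if_pos (by omega), if_pos (by omega)]
    · rw [if_pos (by omega), if_pos (by omega)]
      subst h; exact (pvMsh_succ e j).symm
    · rw [if_neg (by omega), if_neg (by omega), if_neg (by omega)]

theorem pvB_inner (e T : Nat) :
    (PySem.List.pyRange 1 ((T:Int)+1)).foldl
      (fun new t => PySem.List.pySetD new t
        (PySem.List.pyGetD new (t-1) 0 + PySem.List.pyGetD (pvRowB e T) (t-1) 0 + 1))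
      (List.replicate (T+1) 0) = pvRowB (e+1) T := by
  rw [PySem.List.pyRange_one]
  have hT : ((T:Int) + 1 - 1).toNat = T := by omega
  rw [hT, List.foldl_map]
  have key : ∀ j, j ≤ T →
      (List.range j).foldl
        (fun (new : List Int) (k : Nat) => PySem.List.pySetD new (1 + (k:Int))
          (PySem.List.pyGetD new (1 + (k:Int) - 1) 0 +
           PySem.List.pyGetD (pvRowB e T) (1 + (k:Int) - 1) 0 + 1))
        (List.replicate (T+1) 0) = pvPartB (e+1) T j := by
    intro j
    induction j with
    | zero => intro _; simp [pvPartB_zero]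
    | succ j ih =>
      intro hj
      rw [List.range_succ, List.foldl_append, ih (by omega)]
      simpa using pvB_inner_step e T j (by omega)
  rw [key T (le_refl T), pvPartB_last]

theorem pvRowB_zero (T : Nat) : pvRowB 0 T = List.replicate (T+1) 0 := by
  apply List.ext_getElem
  · simp [pvRowB]
  · intro i h1 h2
    simp [pvRowB, pvMsh_zero]

theorem pvB_outer (E T : Nat) :
    (List.range E).foldl (fun (row : List Int) (_ : Nat) =>
      (PySem.List.pyRange 1 ((T:Int)+1)).foldl (fun new t =>
        PySem.List.pySetD new t
          (PySem.List.pyGetD new (t-1) 0 + PySem.List.pyGetD row (t-1) 0 + 1))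
        (List.replicate (T+1) 0)) (List.replicate (T+1) 0) = pvRowB E T := by
  induction E with
  | zero => simp [pvRowB_zero]
  | succ E ih =>
    rw [List.range_succ, List.foldl_append, ih]
    simpa using pvB_inner E T

theorem pvB_eval (E T : Nat) :
    max_skyscrapper_height_with_determinable_target_floor_alt (E:Int) (T:Int) = pvMsh E T := by
  unfold max_skyscrapper_height_with_determinable_target_floor_alt
  have h1 : ((T:Int) + 1).toNat = T + 1 := by omega
  have h2 : ((E:Int)).toNat = E := by omega
  simp only [h1, h2]
  rw [pvB_outer E T, pvRowB, PySem.List.pyGetD_natCast,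
      PySem.List.getD_map_range _ _ _ _ (by omega)]

def pvRowA (e T : Nat) : List (Option Int) := (List.range (T+1)).map (fun t => some (pvMsh e t))
def pvRowInit (T : Nat) : List (Option Int) := [some 0] ++ List.replicate T none
def pvPartA (e T j : Nat) : List (Option Int) :=
  (List.range (T+1)).map (fun t => if t ≤ j then some (pvMsh e t) else none)
def pvTab (E T k : Nat) : List (List (Option Int)) :=
  (List.range (E+1)).map (fun i => if i ≤ k then pvRowA i T else pvRowInit T)
def pvTabP (E T k j : Nat) : List (List (Option Int)) :=
  (List.range (E+1)).map (fun i =>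
    if i ≤ k then pvRowA i T else if i = k+1 then pvPartA (k+1) T j else pvRowInit T)

theorem pvRowA_zero (T : Nat) : pvRowA 0 T = List.replicate (T+1) (some 0) := by
  apply List.ext_getElem
  · simp [pvRowA]
  · intro i h1 h2; simp [pvRowA, pvMsh_zero]

theorem pvPartA_zero (e T : Nat) : pvPartA e T 0 = pvRowInit T := by
  apply List.ext_getElem
  · simp [pvPartA, pvRowInit]
  · intro i h1 h2
    have hi : i < T + 1 := by simpa [pvPartA] using h1
    simp only [pvPartA, pvRowInit, List.getElem_map, List.getElem_range]
    cases i with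
    | zero => simp [pvMsh_e_zero]
    | succ i => simp

theorem pvPartA_last (e T : Nat) : pvPartA e T T = pvRowA e T := by
  apply List.ext_getElem
  · simp [pvPartA, pvRowA]
  · intro i h1 h2
    have hi : i < T + 1 := by simpa [pvPartA] using h1
    simp only [pvPartA, pvRowA, List.getElem_map, List.getElem_range]
    rw [if_pos (by omega)]

theorem pvTabP_zero (E T k : Nat) : pvTabP E T k 0 = pvTab E T k := by
  apply List.ext_getElem
  · simp [pvTabP, pvTab]
  · intro i h1 h2
    have hi : i < E + 1 := by simpa [pvTabP] using h1
    simp only [pvTabP, pvTab, List.getElem_map, List.getElem_range]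
    split_ifs with ha hb
    · rfl
    · rw [pvPartA_zero]
    · rfl

theorem pvTabP_last (E T k : Nat) : pvTabP E T k T = pvTab E T (k+1) := by
  apply List.ext_getElem
  · simp [pvTabP, pvTab]
  · intro i h1 h2
    have hi : i < E + 1 := by simpa [pvTabP] using h1
    simp only [pvTabP, pvTab, List.getElem_map, List.getElem_range]
    by_cases ha : i ≤ k
    · rw [if_pos ha, if_pos (by omega)]
    · by_cases hb : i = k + 1
      · rw [if_neg ha, if_pos hb, if_pos (by omega), hb, pvPartA_last]
      · rw [if_neg ha, if_neg hb, if_neg (by omega)]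

theorem pvA_init (E T : Nat) :
    [List.replicate (T + 1) (some 0)] ++
      (List.range E).map (fun _ => [some 0] ++ List.replicate T none) = pvTab E T 0 := by
  apply List.ext_getElem
  · simp [pvTab]
  · intro i h1 h2
    have hi : i < E + 1 := by simpa [pvTab] using h2
    simp only [pvTab, List.getElem_map, List.getElem_range]
    cases i with
    | zero => simp [pvRowA_zero]
    | succ i =>
      have : ¬ (i + 1 ≤ 0) := by omega
      rw [if_neg this]
      simp only [List.getElem_append]
      simp [pvRowInit]

theorem pvTabP_getD_prev (E T k j : Nat) (hk : k < E) :
    PySem.List.pyGetD (pvTabP E T k j) (1 + (k:Int) - 1) [] = pvRowA k T := by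
  have h : 1 + (k:Int) - 1 = ((k:Nat):Int) := by ring
  rw [h, PySem.List.pyGetD_natCast, pvTabP,
      PySem.List.getD_map_range _ _ _ _ (by omega), if_pos (le_refl k)]

theorem pvTabP_getD_cur (E T k j : Nat) (hk : k < E) :
    PySem.List.pyGetD (pvTabP E T k j) (1 + (k:Int)) [] = pvPartA (k+1) T j := by
  have h : 1 + (k:Int) = ((k+1 : Nat):Int) := by push_cast; ring
  rw [h, PySem.List.pyGetD_natCast, pvTabP,
      PySem.List.getD_map_range _ _ _ _ (by omega), if_neg (by omega), if_pos rfl]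

theorem pvA_val (T k j : Nat) (hj : j < T) :
    ((PySem.List.pyRange 0 (1 + (j:Int))).map
      (fun t'' => (PySem.List.pyGetD (pvRowA k T) t'' none).getD 0 + 1)).sum
    = pvMsh (k+1) (j+1) := by
  have h : 1 + (j:Int) = ((j+1 : Nat):Int) := by push_cast; ring
  rw [h, PySem.List.pyRange_zero_natCast, List.map_map, ← pvMsh_sum k (j+1)]
  apply congrArg
  apply List.map_congr_left
  intro a ha
  have haj : a < T + 1 := by have := List.mem_range.mp ha; omega
  simp only [Function.comp_apply, PySem.List.pyGetD_natCast, pvRowA]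
  rw [PySem.List.getD_map_range _ _ _ _ haj]
  rfl

theorem pvA_row_step (T k j : Nat) (hj : j < T) :
    PySem.List.pySetD (pvPartA (k+1) T j) (1 + (j:Int)) (some (pvMsh (k+1) (j+1)))
    = pvPartA (k+1) T (j+1) := by
  have h2 : 1 + (j:Int) = ((j+1 : Nat):Int) := by push_cast; ring
  rw [h2, PySem.List.pySetD_natCast]
  apply List.ext_getElem
  · simp [pvPartA]
  · intro i ha hb
    have hi : i < T + 1 := by simpa [pvPartA] using hb
    simp only [pvPartA, List.getElem_set, List.getElem_map, List.getElem_range]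
    rcases Nat.lt_trichotomy i (j+1) with h | h | h
    · rw [if_neg (by omega), if_pos (by omega), if_pos (by omega)]
    · rw [if_pos (by omega), if_pos (by omega)]; rw [h]
    · rw [if_neg (by omega), if_neg (by omega), if_neg (by omega)]

theorem pvA_tab_step (E T k j : Nat) (hk : k < E) :
    PySem.List.pySetD (pvTabP E T k j) (1 + (k:Int)) (pvPartA (k+1) T (j+1))
    = pvTabP E T k (j+1) := by
  have h2 : 1 + (k:Int) = ((k+1 : Nat):Int) := by push_cast; ring
  rw [h2, PySem.List.pySetD_natCast]
  apply List.ext_getElem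
  · simp [pvTabP]
  · intro i ha hb
    have hi : i < E + 1 := by simpa [pvTabP] using hb
    simp only [pvTabP, List.getElem_set, List.getElem_map, List.getElem_range]
    by_cases h : k + 1 = i
    · rw [if_pos h, if_neg (by omega), if_pos (by omega)]
    · rw [if_neg h]
      by_cases h3 : i ≤ k
      · rw [if_pos h3, if_pos h3]
      · rw [if_neg h3, if_neg h3, if_neg (by omega), if_neg (by omega)]

theorem pvA_inner (E T k : Nat) (hk : k < E) :
    (PySem.List.pyRange 1 ((T:Int)+1)).foldl (fun msh tries_ =>
      PySem.List.pySetD msh (1 + (k:Int))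
        (PySem.List.pySetD (PySem.List.pyGetD msh (1 + (k:Int)) []) tries_
          (some (((PySem.List.pyRange 0 tries_).map
            (fun tries__ =>
              (PySem.List.pyGetD (PySem.List.pyGetD msh (1 + (k:Int) - 1) []) tries__ none).getD 0
                + 1)).sum))))
      (pvTab E T k) = pvTab E T (k+1) := by
  rw [PySem.List.pyRange_one]
  have hT : ((T:Int) + 1 - 1).toNat = T := by omega
  rw [hT, List.foldl_map]
  have key : ∀ j, j ≤ T →
      (List.range j).foldl
        (fun (msh : List (List (Option Int))) (t : Nat) =>
          PySem.List.pySetD msh (1 + (k:Int))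
            (PySem.List.pySetD (PySem.List.pyGetD msh (1 + (k:Int)) []) (1 + (t:Int))
              (some (((PySem.List.pyRange 0 (1 + (t:Int))).map
                (fun tries__ =>
                  (PySem.List.pyGetD (PySem.List.pyGetD msh (1 + (k:Int) - 1) []) tries__ none).getD 0
                    + 1)).sum))))
        (pvTab E T k) = pvTabP E T k j := by
    intro j
    induction j with
    | zero => intro _; simp [pvTabP_zero]
    | succ j ih =>
      intro hj
      rw [List.range_succ, List.foldl_append, ih (by omega)]
      simp only [List.foldl_cons, List.foldl_nil]
      rw [pvTabP_getD_prev E T k j hk, pvTabP_getD_cur E T k j hk,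
          pvA_val T k j (by omega), pvA_row_step T k j (by omega),
          pvA_tab_step E T k j hk]
  rw [key T (le_refl T), pvTabP_last]

theorem pvA_outer (E T : Nat) : ∀ k, k ≤ E →
    (List.range k).foldl (fun (msh : List (List (Option Int))) (k' : Nat) =>
      (PySem.List.pyRange 1 ((T:Int)+1)).foldl (fun msh tries_ =>
        PySem.List.pySetD msh (1 + (k':Int))
          (PySem.List.pySetD (PySem.List.pyGetD msh (1 + (k':Int)) []) tries_
            (some (((PySem.List.pyRange 0 tries_).map
              (fun tries__ =>
                (PySem.List.pyGetD (PySem.List.pyGetD msh (1 + (k':Int) - 1) []) tries__ none).getD 0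
                  + 1)).sum)))) msh)
      (pvTab E T 0) = pvTab E T k := by
  intro k
  induction k with
  | zero => intro _; rfl
  | succ k ih =>
    intro hk
    rw [List.range_succ, List.foldl_append, ih (by omega)]
    simp only [List.foldl_cons, List.foldl_nil]
    exact pvA_inner E T k (by omega)

theorem pvA_eval (E T : Nat) :
    max_skyscrapper_height_with_determinable_target_floor (E:Int) (T:Int) = pvMsh E T := by
  unfold max_skyscrapper_height_with_determinable_target_floor
  have h1 : ((T:Int) + 1).toNat = T + 1 := by omega
  have h2 : ((E:Int)).toNat = E := by omega
  have h3 : ((T:Int)).toNat = T := by omega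
  simp only [h1, h2, h3]
  rw [pvA_init E T, PySem.List.pyRange_one 1 ((E:Int)+1)]
  have hE : ((E:Int) + 1 - 1).toNat = E := by omega
  rw [hE, List.foldl_map, pvA_outer E T E (le_refl E), pvTab,
      PySem.List.pyGetD_natCast, PySem.List.pyGetD_natCast,
      PySem.List.getD_map_range _ _ _ _ (by omega : E < E + 1),
      if_pos (le_refl E), pvRowA,
      PySem.List.getD_map_range _ _ _ _ (by omega : T < T + 1)]
  rfl

theorem pvGetD_singleton_neg_one {α : Type} (x d : α) : PySem.List.pyGetD [x] (-1) d = x := by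
  simp [PySem.List.pyGetD, PySem.List.pyGet?, PySem.List.pyIdx?]

theorem pvA_neg_one (T : Nat) :
    max_skyscrapper_height_with_determinable_target_floor (-1) (T:Int) = 0 := by
  unfold max_skyscrapper_height_with_determinable_target_floor
  have h0 : ((-1:Int)).toNat = 0 := rfl
  have h1 : ((T:Int) + 1).toNat = T + 1 := by omega
  have h2 : PySem.List.pyRange 1 ((-1:Int) + 1) 1 = [] := by decide
  simp only [h0, h1, h2, List.range_zero, List.map_nil, List.append_nil, List.foldl_nil]
  rw [pvGetD_singleton_neg_one, PySem.List.pyGetD_natCast,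
      List.getD_replicate _ (by omega)]
  rfl

theorem pvB_neg_one (T : Nat) :
    max_skyscrapper_height_with_determinable_target_floor_alt (-1) (T:Int) = 0 := by
  unfold max_skyscrapper_height_with_determinable_target_floor_alt
  have h0 : ((-1:Int)).toNat = 0 := rfl
  have h1 : ((T:Int) + 1).toNat = T + 1 := by omega
  simp only [h0, h1, List.range_zero, List.foldl_nil, PySem.List.pyGetD_natCast]
  rw [List.getD_replicate _ (by omega)]

-- ===== VERDICT (by name: the statement is the Claim_ definition above) =====
theorem max_skyscrapper_height_with_determinable_target_floor_spec : Claim_equal_max_skyscrapper_height_with_determinable_target_floor := by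
  intro eggs tries _ hpre
  unfold Pre_max_skyscrapper_height_with_determinable_target_floor at hpre
  unfold Spec_max_skyscrapper_height_with_determinable_target_floor
  obtain ⟨ht, he⟩ := hpre
  obtain ⟨T, rfl⟩ : ∃ T : Nat, tries = (T:Int) := ⟨tries.toNat, (Int.toNat_of_nonneg ht).symm⟩
  rcases eq_or_lt_of_le he with heq | hlt
  · rw [← heq, pvA_neg_one, pvB_neg_one]
  · have he0 : 0 ≤ eggs := by omega
    obtain ⟨E, rfl⟩ : ∃ E : Nat, eggs = (E:Int) := ⟨eggs.toNat, (Int.toNat_of_nonneg he0).symm⟩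
    rw [pvA_eval, pvB_eval]
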